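-- pv_equiv track=rewrite | github.com/radfares/nurseRN | src/workflows/unified_research_pipeline.py | _find_pmid_section
-- ===== SOURCE A (Python) =====
-- def _find_pmid_section(text: str, pmid: str) -> str:
--     """Find the section of text discussing a specific PMID."""
--     lines = text.split('\n')
--     section = []
--     in_section = False
--
--     for line in lines:
--         if pmid in line:
--             in_section = True
--         if in_section:
--             section.append(line)
--             if len(section) > 5:
--                 break
--
--     return '\n'.join(section)
-- ===== SOURCE B (Python) =====
-- def _find_pmid_section(text: str, pmid: str) -> str:
--     """Find the section of text discussing a specific PMID."""
--     lines = text.split('\n')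
--     i = next((j for j, line in enumerate(lines) if pmid in line), None)
--     if i is None:
--         return ''
--     return '\n'.join(lines[i:i+6])
-- ===== Notes on version B (the rewrite author's own statement) =====
-- stated objective: simpler
-- what changed: Replaces the flag-and-accumulate scan with a break counter by a locate-then-slice decomposition: find the first matching line index, then join lines[i:i+6].
import Mathlib
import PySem

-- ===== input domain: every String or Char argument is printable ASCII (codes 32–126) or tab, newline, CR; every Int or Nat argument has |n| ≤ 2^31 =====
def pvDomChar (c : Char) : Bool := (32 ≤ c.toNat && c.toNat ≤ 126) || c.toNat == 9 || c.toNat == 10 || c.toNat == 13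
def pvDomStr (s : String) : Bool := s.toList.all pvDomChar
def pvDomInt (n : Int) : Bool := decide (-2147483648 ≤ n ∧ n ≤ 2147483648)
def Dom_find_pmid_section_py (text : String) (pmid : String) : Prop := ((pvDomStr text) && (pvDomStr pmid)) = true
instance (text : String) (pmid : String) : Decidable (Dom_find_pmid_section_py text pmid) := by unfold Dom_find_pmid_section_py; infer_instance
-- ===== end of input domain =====

-- B replaces A's flag-and-accumulate scan (with a break counter) by a locate-then-slice
-- decomposition: find the first matching line index, then join lines[i:i+6]. Objective: simpler.


-- ===== PORT A =====
-- the for-loop with its `in_section` flag, accumulator and `break`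
def pvLoopA (pmid : String) : List String → List String → Bool → List String
  | [], sec, _ => sec
  | l :: rest, sec, ins =>
    let ins' := if PySem.Str.isIn pmid l then true else ins
    if ins' then
      let sec' := sec ++ [l]
      if sec'.length > 5 then sec' else pvLoopA pmid rest sec' ins'
    else pvLoopA pmid rest sec ins'

def find_pmid_section_py (text : String) (pmid : String) : String :=
  let lines := (PySem.Str.split? text "\n").getD []
  PySem.Str.join "\n" (pvLoopA pmid lines [] false)

-- ===== PORT B =====
def find_pmid_section_py_alt (text : String) (pmid : String) : String :=
  let lines := (PySem.Str.split? text "\n").getD []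
  match lines.findIdx? (fun line => PySem.Str.isIn pmid line) with
  | none => ""
  | some i => PySem.Str.join "\n" (PySem.List.slice lines (some (i : Int)) (some ((i : Int) + 6)))

-- ===== PRECONDITION & SPEC =====
def Spec_find_pmid_section_py (text : String) (pmid : String) (out : String) : Prop := out = find_pmid_section_py_alt text pmid
instance (text : String) (pmid : String) (out : String) : Decidable (Spec_find_pmid_section_py text pmid out) := by unfold Spec_find_pmid_section_py; infer_instance

-- ===== CLAIM (what is proved, stated in full; the proofs are below) =====
def Claim_equal_find_pmid_section_py : Prop := ∀ (text : String) (pmid : String), Dom_find_pmid_section_py text pmid → Spec_find_pmid_section_py text pmid (find_pmid_section_py text pmid)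

-- ===== LEMMAS AND PROOFS =====

-- once the flag is set, the loop appends up to (6 - sec.length) more lines
theorem pvLoopA_true (pmid : String) (rest : List String) : ∀ (sec : List String),
    sec.length ≤ 5 → pvLoopA pmid rest sec true = sec ++ rest.take (6 - sec.length) := by
  induction rest with
  | nil => intro sec _; simp [pvLoopA]
  | cons l rs ih =>
    intro sec hsec
    simp only [pvLoopA, ite_self, if_true]
    by_cases h6 : sec.length = 5
    · rw [if_pos (by simp [h6])]
      have h1 : 6 - sec.length = 1 := by omega
      simp [h1]
    · rw [if_neg (by simp only [List.length_append, List.length_cons, List.length_nil]; omega),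
          ih (sec ++ [l]) (by simp only [List.length_append, List.length_cons, List.length_nil]; omega)]
      have h2 : 6 - (sec ++ [l]).length = 5 - sec.length := by simp
      have h3 : 6 - sec.length = (5 - sec.length) + 1 := by omega
      rw [h2, h3, List.take_succ_cons]
      simp

-- the whole loop from the initial state is locate-then-take
theorem pvLoopA_eq (pmid : String) (lines : List String) :
    pvLoopA pmid lines [] false =
      match lines.findIdx? (fun line => PySem.Str.isIn pmid line) with
      | none => []
      | some i => (lines.drop i).take 6 := by
  induction lines with
  | nil => simp [pvLoopA]
  | cons l rs ih =>
    by_cases hl : PySem.Str.isIn pmid l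
    · simp only [pvLoopA, hl, if_true]
      rw [if_neg (by simp), pvLoopA_true pmid rs ([] ++ [l]) (by simp)]
      simp only [List.findIdx?_cons, hl, if_true]
      simp [List.take_succ_cons]
    · simp only [pvLoopA, hl, if_false, Bool.false_eq_true]
      rw [ih]
      simp only [List.findIdx?_cons, hl, Bool.false_eq_true, if_false]
      cases rs.findIdx? (fun line => PySem.Str.isIn pmid line) with
      | none => simp
      | some i => simp

-- ===== VERDICT (by name: the statement is the Claim_ definition above) =====
theorem find_pmid_section_py_spec : Claim_equal_find_pmid_section_py := by
  intro text pmid _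
  unfold Spec_find_pmid_section_py find_pmid_section_py find_pmid_section_py_alt
  simp only [pvLoopA_eq]
  cases h : ((PySem.Str.split? text "\n").getD []).findIdx? (fun line => PySem.Str.isIn pmid line) with
  | none => simp; rfl
  | some i =>
    dsimp only
    rw [show ((i : Int) + 6) = ((i : Int) + ((6 : Nat) : Int)) by norm_num,
        PySem.List.slice_natCast_add]
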